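-- pv_equiv track=rewrite | github.com/olegyuziv/Advent-of-code-2023 | AOC_4/AOC_4_P2.py | count_wins_recursive
-- ===== SOURCE A (Python) =====
-- def count_wins_recursive(points, current_card, memo):
--     """
--     Recursively counts the number of wins using memoization.
--
--     :param points: Dictionary of points for each card.
--     :param current_card: Current card index.
--     :param memo: Dictionary for memoization.
--     :return: Count of wins for the current card.
--     """
--     if current_card not in points:
--         return 0
--
--     if current_card in memo:
--         return memo[current_card]
--
--     total = 1  # Base count for the current card
--     next_card_limit = current_card + points[current_card]
--
--     for next_card in range(current_card + 1, next_card_limit + 1):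
--         total += count_wins_recursive(points, next_card, memo)
--
--     memo[current_card] = total
--     return total
-- ===== SOURCE B (Python) =====
-- def count_wins_recursive(points, current_card, memo):
--     """
--     Bottom-up DP: same return value as the memoized recursion, computed by
--     filling a local table over the card indices in descending order.
--     NOTE: unlike A, this does not mutate `memo` (return value is the contract).
--     """
--     if current_card not in points:
--         return 0
--     if current_card in memo:
--         return memo[current_card]
--     best = {}
--     for card in sorted(points, reverse=True):
--         if card in memo:
--             best[card] = memo[card]
--         else:
--             total = 1
--             for n in range(card + 1, card + points[card] + 1):
--                 if n in points:
--                     total += best[n]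
--             best[card] = total
--     return best[current_card]
-- ===== Notes on version B (the rewrite author's own statement) =====
-- stated objective: alternative
-- what changed: Replaces A's memoized top-down recursion (which threads and mutates the memo dict) with an iterative bottom-up DP that fills a local table over the card indices in descending order; B does not mutate the caller's memo (equivalence is about the return value).
import Mathlib
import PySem

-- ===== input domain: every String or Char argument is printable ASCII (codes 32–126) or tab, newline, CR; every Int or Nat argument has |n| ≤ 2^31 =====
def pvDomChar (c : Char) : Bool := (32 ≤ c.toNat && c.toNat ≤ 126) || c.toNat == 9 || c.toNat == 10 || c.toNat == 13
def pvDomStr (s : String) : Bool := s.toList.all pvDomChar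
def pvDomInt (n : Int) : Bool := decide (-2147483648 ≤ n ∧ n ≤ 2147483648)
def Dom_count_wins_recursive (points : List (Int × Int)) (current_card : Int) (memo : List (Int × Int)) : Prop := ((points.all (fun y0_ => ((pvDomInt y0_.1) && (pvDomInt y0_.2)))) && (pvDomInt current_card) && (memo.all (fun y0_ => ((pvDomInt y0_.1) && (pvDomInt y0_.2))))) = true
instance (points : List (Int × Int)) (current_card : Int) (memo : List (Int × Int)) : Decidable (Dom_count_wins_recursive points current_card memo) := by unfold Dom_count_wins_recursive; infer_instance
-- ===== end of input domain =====

-- B replaces A's memoized top-down recursion by a bottom-up DP table over the card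
-- indices in descending order (objective: alternative). A mutates `memo` in place;
-- B does not — the equivalence proved here is about the RETURN value only.

-- ===== PORT A =====
-- A's recursion, with the shared memo dict threaded through; the Nat fuel only makes
-- the recursion structurally total — `dict.size + 1` fuel is never exhausted (proved
-- below: the chain of recursive calls visits strictly increasing keys of `points`).
def pvAgo (d : PySem.Dict Int Int) : Nat → Int → PySem.Dict Int Int → Int × PySem.Dict Int Int
  | 0, _, m => (0, m)
  | f + 1, c, m =>
    if d.contains c = false then (0, m)
    else if m.contains c then (m.getD c 0, m)
    else
      let nextCardLimit := c + d.getD c 0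
      let r := (PySem.List.pyRange (c + 1) (nextCardLimit + 1) 1).foldl
        (fun acc nextCard =>
          let p := pvAgo d f nextCard acc.2
          (acc.1 + p.1, p.2)) (1, m)
      (r.1, r.2.insert c r.1)

def count_wins_recursive (points : List (Int × Int)) (current_card : Int) (memo : List (Int × Int)) : Int :=
  let d := PySem.Dict.ofList points
  (pvAgo d (d.size + 1) current_card (PySem.Dict.ofList memo)).1

-- ===== PORT B =====
-- `total` for one card, read off the already-filled part of the table
def pvBinner (d best : PySem.Dict Int Int) (card : Int) : Int :=
  (PySem.List.pyRange (card + 1) (card + d.getD card 0 + 1) 1).foldl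
    (fun total n => if d.contains n then total + best.getD n 0 else total) 1

-- the DP table: every key of `points`, filled in descending key order
def pvBtable (d m : PySem.Dict Int Int) : PySem.Dict Int Int :=
  (PySem.List.sorted d.keys id true).foldl
    (fun best card =>
      if m.contains card then best.insert card (m.getD card 0)
      else best.insert card (pvBinner d best card))
    PySem.Dict.empty

def count_wins_recursive_alt (points : List (Int × Int)) (current_card : Int) (memo : List (Int × Int)) : Int :=
  let d := PySem.Dict.ofList points
  let m := PySem.Dict.ofList memo
  if d.contains current_card = false then 0
  else if m.contains current_card then m.getD current_card 0
  else (pvBtable d m).getD current_card 0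

-- ===== PRECONDITION & SPEC =====
def Spec_count_wins_recursive (points : List (Int × Int)) (current_card : Int) (memo : List (Int × Int)) (out : Int) : Prop := out = count_wins_recursive_alt points current_card memo
instance (points : List (Int × Int)) (current_card : Int) (memo : List (Int × Int)) (out : Int) : Decidable (Spec_count_wins_recursive points current_card memo out) := by unfold Spec_count_wins_recursive; infer_instance

-- ===== CLAIM (what is proved, stated in full; the proofs are below) =====
def Claim_equal_count_wins_recursive : Prop := ∀ (points : List (Int × Int)) (current_card : Int) (memo : List (Int × Int)), Dom_count_wins_recursive points current_card memo → Spec_count_wins_recursive points current_card memo (count_wins_recursive points current_card memo)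

-- ===== LEMMAS AND PROOFS =====

-- the common reference value: the pure (memo-free) recurrence, with explicit fuel
def pvV (d m : PySem.Dict Int Int) : Nat → Int → Int
  | 0, _ => 0
  | f + 1, c =>
    if d.contains c = false then 0
    else if m.contains c then m.getD c 0
    else 1 + ((PySem.List.pyRange (c + 1) (c + d.getD c 0 + 1) 1).map (fun n => pvV d m f n)).sum

-- number of keys of d that are ≥ c : the recursion measure
def pvMu (d : PySem.Dict Int Int) (c : Int) : Nat :=
  (d.keys.filter (fun k => decide (c ≤ k))).length

def pvVal (d m : PySem.Dict Int Int) (c : Int) : Int := pvV d m (pvMu d c + 1) c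

lemma pv_countP_lt (p q : Int → Bool) (c : Int) :
    ∀ l : List Int, c ∈ l → (∀ a, p a = true → q a = true) → p c = false → q c = true →
      l.countP p < l.countP q := by
  intro l hc h hp hq
  induction l with
  | nil => cases hc
  | cons a t ih =>
    rcases List.mem_cons.1 hc with rfl | ha
    · have h1 : t.countP p ≤ t.countP q := List.countP_mono_left (fun a _ => h a)
      simp [hp, hq]; omega
    · have := ih ha
      simp only [List.countP_cons]
      by_cases hpa : p a = true
      · simp [hpa, h a hpa]; omega
      · simp only [Bool.not_eq_true] at hpa
        simp [hpa]
        by_cases hqa : q a = true <;> simp [hqa] <;> omega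

lemma pvMu_le_size (d : PySem.Dict Int Int) (c : Int) : pvMu d c ≤ d.size := by
  have h := List.length_filter_le (fun k => decide (c ≤ k)) d.keys
  unfold pvMu
  calc (d.keys.filter (fun k => decide (c ≤ k))).length ≤ d.keys.length := h
    _ = d.size := by simp [PySem.Dict.keys, PySem.Dict.size]

lemma pvMu_lt (d : PySem.Dict Int Int) {c n : Int} (hc : d.contains c = true) (hn : c + 1 ≤ n) :
    pvMu d n < pvMu d c := by
  have hck : c ∈ d.keys := (PySem.Dict.contains_iff_mem_keys d c).1 hc
  unfold pvMu
  rw [← List.countP_eq_length_filter, ← List.countP_eq_length_filter]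
  exact pv_countP_lt _ _ c d.keys hck
    (by intro a ha; simp at ha ⊢; omega)
    (by simp; omega) (by simp)

lemma pvV_succ (d m : PySem.Dict Int Int) (f : Nat) (c : Int) :
    pvV d m (f + 1) c =
      (if d.contains c = false then 0
       else if m.contains c then m.getD c 0
       else 1 + ((PySem.List.pyRange (c + 1) (c + d.getD c 0 + 1) 1).map
         (fun n => pvV d m f n)).sum) := rfl

-- stabilization: any sufficient fuel gives the same value
lemma pvV_stable (d m : PySem.Dict Int Int) :
    ∀ f c, pvMu d c + 1 ≤ f → pvV d m f c = pvVal d m c := by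
  intro f
  induction f using Nat.strong_induction_on with
  | _ f ih =>
    intro c hf
    match f, hf with
    | f' + 1, hf =>
      rw [pvVal, pvV_succ, pvV_succ]
      by_cases hc : d.contains c = false
      · rw [if_pos hc, if_pos hc]
      · replace hc : d.contains c = true := by cases h : d.contains c <;> simp_all
        by_cases hm : m.contains c = true
        · simp [hc, hm]
        · replace hm : m.contains c = false := by cases h : m.contains c <;> simp_all
          simp only [hc, hm, Bool.true_eq_false, Bool.false_eq_true, if_false]
          congr 1
          apply congrArg List.sum
          apply List.map_eq_map_iff.mpr
          intro n hn
          have hn' : c + 1 ≤ n := ((PySem.List.mem_pyRange_one).1 hn).1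
          have hlt := pvMu_lt d hc hn'
          rw [ih f' (by omega) n (by omega), ih (pvMu d c) (by omega) n (by omega)]

-- the inner sum of pvVal, with each summand written as the true value
lemma pvVal_eq_sum (d m : PySem.Dict Int Int) {c : Int}
    (hc : d.contains c = true) (hm : m.contains c = false) :
    pvVal d m c = 1 + ((PySem.List.pyRange (c + 1) (c + d.getD c 0 + 1) 1).map
      (fun n => pvVal d m n)).sum := by
  rw [pvVal, pvV_succ]
  simp only [hc, hm, Bool.true_eq_false, Bool.false_eq_true, if_false]
  congr 1
  apply congrArg List.sum
  apply List.map_eq_map_iff.mpr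
  intro n hn
  have hn' : c + 1 ≤ n := ((PySem.List.mem_pyRange_one).1 hn).1
  have hlt := pvMu_lt d hc hn'
  exact pvV_stable d m (pvMu d c) n (by omega)

lemma pvVal_of_not_contains (d m : PySem.Dict Int Int) {c : Int} (hc : d.contains c = false) :
    pvVal d m c = 0 := by
  simp [pvVal, pvV, hc]

-- A's memo invariant relative to the initial memo m0
def pvInv (d m0 mm : PySem.Dict Int Int) : Prop :=
  (∀ k, m0.contains k = true → mm.get? k = m0.get? k) ∧
  (∀ k v, mm.get? k = some v → m0.contains k = true ∨ (d.contains k = true ∧ v = pvVal d m0 k))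

lemma pvAgo_succ (d : PySem.Dict Int Int) (f : Nat) (c : Int) (mm : PySem.Dict Int Int) :
    pvAgo d (f + 1) c mm =
      (if d.contains c = false then (0, mm)
       else if mm.contains c then (mm.getD c 0, mm)
       else
         let r := (PySem.List.pyRange (c + 1) (c + d.getD c 0 + 1) 1).foldl
           (fun acc nextCard =>
             let p := pvAgo d f nextCard acc.2
             (acc.1 + p.1, p.2)) (1, mm)
         (r.1, r.2.insert c r.1)) := rfl

lemma pvInv_not_contains (d m0 mm : PySem.Dict Int Int) (h : pvInv d m0 mm) {c : Int}
    (hmm : mm.contains c = false) : m0.contains c = false := by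
  by_cases h0 : m0.contains c = true
  · have h1 := h.1 c h0
    rw [PySem.Dict.contains_eq_isSome_get?, h1, ← PySem.Dict.contains_eq_isSome_get?] at hmm
    rw [h0] at hmm; cases hmm
  · cases h2 : m0.contains c
    · rfl
    · exact absurd h2 h0

lemma pvInv_insert (d m0 mm : PySem.Dict Int Int) (hinv : pvInv d m0 mm) {c v : Int}
    (hc : d.contains c = true) (hm0 : m0.contains c = false) (hval : v = pvVal d m0 c) :
    pvInv d m0 (mm.insert c v) := by
  constructor
  · intro k hk
    rw [PySem.Dict.get?_insert]
    split_ifs with he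
    · rw [he] at hk; rw [hk] at hm0; cases hm0
    · exact hinv.1 k hk
  · intro k w hw
    rw [PySem.Dict.get?_insert] at hw
    split_ifs at hw with he
    · subst he
      exact Or.inr ⟨hc, by injection hw with h; omega⟩
    · exact hinv.2 k w hw

-- one pass of A's `for next_card in range(...)` loop, each call at sufficient fuel
lemma pvAgo_fold (d m0 : PySem.Dict Int Int) (f : Nat)
    (ih : ∀ n mm, pvInv d m0 mm → pvMu d n + 1 ≤ f →
      (pvAgo d f n mm).1 = pvVal d m0 n ∧ pvInv d m0 (pvAgo d f n mm).2) :
    ∀ (l : List Int) (t : Int) (mm : PySem.Dict Int Int), pvInv d m0 mm →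
      (∀ n ∈ l, pvMu d n + 1 ≤ f) →
      (l.foldl (fun acc nextCard =>
          let p := pvAgo d f nextCard acc.2
          (acc.1 + p.1, p.2)) (t, mm)).1 = t + (l.map (fun n => pvVal d m0 n)).sum ∧
      pvInv d m0 ((l.foldl (fun acc nextCard =>
          let p := pvAgo d f nextCard acc.2
          (acc.1 + p.1, p.2)) (t, mm)).2) := by
  intro l
  induction l with
  | nil => intro t mm hinv _; exact ⟨by simp, hinv⟩
  | cons a tl ihl =>
    intro t mm hinv hfu
    have ha := ih a mm hinv (hfu a (by simp))
    simp only [List.foldl_cons]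
    have hrest := ihl (t + (pvAgo d f a mm).1) (pvAgo d f a mm).2 ha.2
      (fun n hn => hfu n (by simp [hn]))
    refine ⟨?_, hrest.2⟩
    rw [hrest.1, ha.1]
    simp [List.map_cons, List.sum_cons]
    ring

-- correctness of port A's recursion
lemma pvAgo_correct (d m0 : PySem.Dict Int Int) :
    ∀ f c mm, pvInv d m0 mm → pvMu d c + 1 ≤ f →
      (pvAgo d f c mm).1 = pvVal d m0 c ∧ pvInv d m0 (pvAgo d f c mm).2 := by
  intro f
  induction f using Nat.strong_induction_on with
  | _ f ih =>
    intro c mm hinv hf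
    match f, hf with
    | f' + 1, hf =>
      rw [pvAgo_succ]
      by_cases hc : d.contains c = false
      · rw [if_pos hc]
        exact ⟨(pvVal_of_not_contains d m0 hc).symm, hinv⟩
      · replace hc : d.contains c = true := by cases h : d.contains c <;> simp_all
        rw [if_neg (by simp [hc])]
        by_cases hm : mm.contains c = true
        · rw [if_pos hm]
          refine ⟨?_, hinv⟩
          have hsome : ∃ v, mm.get? c = some v := by
            rw [PySem.Dict.contains_eq_isSome_get?] at hm
            exact Option.isSome_iff_exists.1 hm
          obtain ⟨v, hv⟩ := hsome
          have hgd : mm.getD c 0 = v := by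
            rw [PySem.Dict.getD_eq_get?_getD, hv]; rfl
          rcases hinv.2 c v hv with h0 | ⟨_, hval⟩
          · have h1 := hinv.1 c h0
            rw [h1] at hv
            rw [pvVal, pvV_succ, if_neg (by simp [hc]), if_pos h0, hgd]
            rw [PySem.Dict.getD_eq_get?_getD, hv]; rfl
          · rw [hgd, hval]
        · replace hm : mm.contains c = false := by cases h : mm.contains c <;> simp_all
          rw [if_neg (by simp [hm])]
          have hm0 : m0.contains c = false := pvInv_not_contains d m0 mm hinv hm
          have hfu : ∀ n ∈ PySem.List.pyRange (c + 1) (c + d.getD c 0 + 1) 1,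
              pvMu d n + 1 ≤ f' := by
            intro n hn
            have hn' : c + 1 ≤ n := ((PySem.List.mem_pyRange_one).1 hn).1
            have := pvMu_lt d hc hn'
            omega
          have hfold := pvAgo_fold d m0 f'
            (fun n mm' hin hfn => ih f' (by omega) n mm' hin hfn)
            (PySem.List.pyRange (c + 1) (c + d.getD c 0 + 1) 1) 1 mm hinv hfu
          have hval : (( PySem.List.pyRange (c + 1) (c + d.getD c 0 + 1) 1).foldl
              (fun acc nextCard =>
                let p := pvAgo d f' nextCard acc.2
                (acc.1 + p.1, p.2)) (1, mm)).1 = pvVal d m0 c := by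
            rw [hfold.1, pvVal_eq_sum d m0 hc hm0]
          exact ⟨hval, pvInv_insert d m0 _ hfold.2 hc hm0 hval⟩

-- B's descending-order fill: every key processed so far holds its true value
lemma pvBfold (d m0 : PySem.Dict Int Int) :
    ∀ (l : List Int) (best : PySem.Dict Int Int),
      l.Pairwise (fun a b => b ≤ a) → (∀ n ∈ l, d.contains n = true) →
      (∀ k, d.contains k = true → k ∉ l → best.getD k 0 = pvVal d m0 k) →
      ∀ k, d.contains k = true →
        ((l.foldl (fun best card =>
            if m0.contains card then best.insert card (m0.getD card 0)
            else best.insert card (pvBinner d best card)) best).getD k 0 = pvVal d m0 k) := by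
  intro l
  induction l with
  | nil => intro best _ _ H k hk; exact H k hk (by simp)
  | cons card rest ihl =>
    intro best hpair hmem H k hk
    have hcard : d.contains card = true := hmem card (by simp)
    have hrest_le : ∀ b ∈ rest, b ≤ card := (List.pairwise_cons.1 hpair).1
    simp only [List.foldl_cons]
    refine ihl _ ((List.pairwise_cons.1 hpair).2)
      (fun n hn => hmem n (List.mem_cons_of_mem _ hn)) ?_ k hk
    -- the new table is correct on every key outside `rest`
    intro k' hk' hk'n
    by_cases he : k' = card
    · subst he
      by_cases hm : m0.contains k' = true
      · rw [if_pos hm, PySem.Dict.getD_insert, if_pos rfl]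
        rw [pvVal, pvV_succ, if_neg (by simp [hk']), if_pos hm]
      · replace hm : m0.contains k' = false := by cases h : m0.contains k' <;> simp_all
        rw [if_neg (by simp [hm]), PySem.Dict.getD_insert, if_pos rfl]
        rw [pvVal_eq_sum d m0 hk' hm]
        unfold pvBinner
        have hshape : List.foldl
            (fun total n => if d.contains n = true then total + best.getD n 0 else total) 1
            (PySem.List.pyRange (k' + 1) (k' + d.getD k' 0 + 1) 1)
            = List.foldl
            (fun total n => total + (if d.contains n = true then best.getD n 0 else 0)) 1
            (PySem.List.pyRange (k' + 1) (k' + d.getD k' 0 + 1) 1) :=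
          PySem.List.foldl_congr_mem
            (PySem.List.pyRange (k' + 1) (k' + d.getD k' 0 + 1) 1)
            (fun total n => if d.contains n = true then total + best.getD n 0 else total)
            (fun total n => total + (if d.contains n = true then best.getD n 0 else 0)) 1
            (by intro acc x _; beta_reduce; split_ifs <;> simp)
        rw [hshape, PySem.List.foldl_add]
        congr 1
        apply congrArg List.sum
        apply List.map_eq_map_iff.mpr
        intro n hn
        have hn' : k' + 1 ≤ n := ((PySem.List.mem_pyRange_one).1 hn).1
        by_cases hdn : d.contains n = true
        · rw [if_pos hdn]
          apply H n hdn
          intro hmem'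
          rcases List.mem_cons.1 hmem' with rfl | h'
          · omega
          · have := hrest_le n h'; omega
        · replace hdn : d.contains n = false := by cases h : d.contains n <;> simp_all
          rw [if_neg (by simp [hdn]), pvVal_of_not_contains d m0 hdn]
    · have hne : k' ∉ (card :: rest) := by
        intro hmem'
        rcases List.mem_cons.1 hmem' with h' | h'
        · exact he h'
        · exact hk'n h'
      split_ifs <;> rw [PySem.Dict.getD_insert, if_neg he] <;> exact H k' hk' hne

-- correctness of B's table
lemma pvBtable_correct (d m0 : PySem.Dict Int Int) :
    ∀ k, d.contains k = true → (pvBtable d m0).getD k 0 = pvVal d m0 k := by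
  intro k hk
  unfold pvBtable
  apply pvBfold d m0 (PySem.List.sorted d.keys id true) PySem.Dict.empty
  · simpa using PySem.List.sorted_pairwise_rev d.keys id
  · intro n hn
    rw [PySem.Dict.contains_iff_mem_keys]
    exact (PySem.List.mem_sorted _ _ _ _).1 hn
  · intro k' hk' hk'n
    exact absurd ((PySem.List.mem_sorted _ _ _ _).2 ((PySem.Dict.contains_iff_mem_keys d k').1 hk')) hk'n
  · exact hk

-- ===== VERDICT (by name: the statement is the Claim_ definition above) =====
theorem count_wins_recursive_spec : Claim_equal_count_wins_recursive := by
  intro points current_card memo _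
  unfold Spec_count_wins_recursive count_wins_recursive count_wins_recursive_alt
  set d := PySem.Dict.ofList points with hd
  set m := PySem.Dict.ofList memo with hm
  have hinv : pvInv d m m := by
    constructor
    · intro k _; rfl
    · intro k v hk; exact Or.inl (by rw [PySem.Dict.contains_eq_isSome_get?, hk]; rfl)
  have hfuel : pvMu d current_card + 1 ≤ d.size + 1 := by
    have := pvMu_le_size d current_card; omega
  have hA := (pvAgo_correct d m (d.size + 1) current_card m hinv hfuel).1
  simp only [hA]
  by_cases hcd : d.contains current_card = false
  · simp [hcd, pvVal_of_not_contains d m hcd]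
  · replace hcd : d.contains current_card = true := by
      cases h : d.contains current_card <;> simp_all
    by_cases hcm : m.contains current_card = true
    · simp [hcd, hcm]
      rw [pvVal]; simp [pvV, hcd, hcm]
    · rw [Bool.not_eq_true] at hcm
      simp [hcd, hcm]
      exact (pvBtable_correct d m current_card hcd).symm
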